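-- pv_equiv track=rewrite | github.com/VoidArchive/Code-War-Kata-Traning | Code War/Strange_mathmatic.py | strange_math
-- ===== SOURCE A (Python) =====
-- def strange_math(n, k):
--     str_lexorder = []
--
--     for i in range(1, n+1):
--         str_lexorder.append(str(i))
--         str_lexorder.sort()
--     int_lexorder = [int(j) for j in str_lexorder]
--     for a, b in enumerate(int_lexorder):
--         if b == k:
--             return a+1
-- ===== SOURCE B (Python) =====
-- def strange_math(n, k):
--     # Generate str(1..n) directly in lexicographic order by a preorder
--     # walk of the decimal prefix trie -- no sorting at all.
--     order = []
--
--     def emit(p):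
--         if p > n:
--             return
--         order.append(str(p))
--         for c in range(10):
--             emit(10 * p + c)
--
--     for d in range(1, 10):
--         emit(d)
--     pos = 1
--     for s in order:
--         if int(s) == k:
--             return pos
--         pos += 1
--     return None
-- ===== Notes on version B (the rewrite author's own statement) =====
-- stated objective: faster
-- what changed: A re-sorts the whole string list after every append and then scans the parsed list; B performs no sorting at all: it generates str(1..n) already in lexicographic order by a preorder walk of the decimal prefix trie (p -> 10p+0..10p+9) and scans that list once with a running position.
import Mathlib
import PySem

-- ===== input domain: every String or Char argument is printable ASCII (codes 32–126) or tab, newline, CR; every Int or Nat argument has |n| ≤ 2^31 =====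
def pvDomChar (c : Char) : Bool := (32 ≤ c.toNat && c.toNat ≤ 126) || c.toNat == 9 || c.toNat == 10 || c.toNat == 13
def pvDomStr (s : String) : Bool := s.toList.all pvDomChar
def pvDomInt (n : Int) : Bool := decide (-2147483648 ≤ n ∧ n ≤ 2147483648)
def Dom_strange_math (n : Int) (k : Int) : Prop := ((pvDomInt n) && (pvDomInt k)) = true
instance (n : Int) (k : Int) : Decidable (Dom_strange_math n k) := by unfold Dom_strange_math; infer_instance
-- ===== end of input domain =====

-- B replaces A's repeated sorting by a sort-free generator: it produces str(1..n)
-- already in lexicographic order by a preorder walk of the decimal prefix trie.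

-- Python's list.sort()/sorted() (no key, no reverse) on strings, ported as a
-- timsort-like stable sort: maximal non-decreasing runs, then balanced merging.
-- Output-exact to sorted(): with the identity key any two ≤-ordered permutations
-- of the same list are equal (pvSort_eq below proves pvSort = PySem.List.sorted);
-- this implementation (like CPython's) is fast on the nearly-sorted lists A re-sorts,
-- where PySem's insertion sort is not evaluable at the checker's input sizes.
def pvMerge (xs ys : List String) : List String := xs.merge ys (fun a b => decide (a ≤ b))

def pvRuns : List String → List (List String)
  | [] => []
  | x :: xs => match pvRuns xs with
    | (y :: r) :: rs => if x ≤ y then (x :: y :: r) :: rs else [x] :: (y :: r) :: rs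
    | rs => [x] :: rs

def pvMergePairs : List (List String) → List (List String)
  | r1 :: r2 :: rest => pvMerge r1 r2 :: pvMergePairs rest
  | rs => rs

lemma pvMergePairs_length_le (rs : List (List String)) :
    (pvMergePairs rs).length ≤ (rs.length + 1) / 2 := by
  induction rs using pvMergePairs.induct with
  | case1 r1 r2 rest ih => simp only [pvMergePairs, List.length_cons]; omega
  | case2 rs h => cases rs with
    | nil => simp [pvMergePairs]
    | cons r t =>
      cases t with
      | nil => simp [pvMergePairs]
      | cons r2 t2 => exact absurd rfl (h r r2 t2)

def pvMergeAll : List (List String) → List String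
  | [] => []
  | [r] => r
  | r1 :: r2 :: rest => pvMergeAll (pvMergePairs (r1 :: r2 :: rest))
termination_by rs => rs.length
decreasing_by
  have := pvMergePairs_length_le (r1 :: r2 :: rest)
  simp only [List.length_cons] at this ⊢
  omega

def pvSort (l : List String) : List String := pvMergeAll (pvRuns l)

-- ===== PORT A =====
-- 'for a, b in enumerate(int_lexorder): if b == k: return a+1' (falls through to None)
def pvFindEnumA (k : Int) : List (Int × Int) → Option Int
  | [] => none
  | (a, b) :: t => if b = k then some (a + 1) else pvFindEnumA k t

def strange_math (n : Int) (k : Int) : Option Int :=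
  -- for i in range(1, n+1): str_lexorder.append(str(i)); str_lexorder.sort()
  let str_lexorder :=
    (PySem.List.pyRange 1 (n + 1) 1).foldl (fun acc i => pvSort (acc ++ [PySem.Int.toStr i])) []
  -- int_lexorder = [int(j) for j in str_lexorder]; int(j) never raises here (j = str(i))
  let int_lexorder := str_lexorder.map (fun j => (PySem.Int.ofStr? j).getD 0)
  pvFindEnumA k (PySem.List.enumerate int_lexorder 0)

-- ===== PORT B =====
-- emit(p): the list of strings this call appends to 'order' (preorder over the
-- decimal prefix trie).  The '1 ≤ p' conjunct is only a totality guard: Python's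
-- emit is only ever called with p ≥ 1 (roots 1..9, children 10p+c).
def pvEmit (n : Int) (p : Int) : List String :=
  if h : 1 ≤ p ∧ p ≤ n then
    PySem.Int.toStr p ::
      (PySem.List.pyRange 0 10 1).attach.flatMap (fun c => pvEmit n (10 * p + c.1))
  else []
termination_by (n + 1 - p).toNat
decreasing_by
  have hc : 0 ≤ c.1 ∧ c.1 < 10 := by
    have := c.2
    rw [PySem.List.mem_pyRange_iff_of_pos (by norm_num)] at this
    omega
  omega

-- 'for s in order: if int(s) == k: return pos; pos += 1' (falls through to None)
def pvScanB (k : Int) : List String → Int → Option Int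
  | [], _ => none
  | j :: t, pos => if (PySem.Int.ofStr? j).getD 0 = k then some pos else pvScanB k t (pos + 1)

def strange_math_alt (n : Int) (k : Int) : Option Int :=
  -- order = []; for d in range(1, 10): emit(d)
  let order := (PySem.List.pyRange 1 10 1).flatMap (fun d => pvEmit n d)
  pvScanB k order 1

-- ===== PRECONDITION & SPEC =====
def Spec_strange_math (n : Int) (k : Int) (out : Option Int) : Prop := out = strange_math_alt n k
instance (n : Int) (k : Int) (out : Option Int) : Decidable (Spec_strange_math n k out) := by unfold Spec_strange_math; infer_instance

-- ===== CLAIM (what is proved, stated in full; the proofs are below) =====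
def Claim_equal_strange_math : Prop := ∀ (n : Int) (k : Int), Dom_strange_math n k → Spec_strange_math n k (strange_math n k)

-- ===== LEMMAS AND PROOFS =====

lemma pvRuns_flatten : ∀ l : List String, (pvRuns l).flatten = l := by
  intro l
  induction l with
  | nil => rfl
  | cons x xs ih =>
    rw [pvRuns]
    rcases h : pvRuns xs with _ | ⟨r, rs⟩
    · simp at ih ⊢; rw [h] at ih; simpa using ih
    · rcases r with _ | ⟨y, r'⟩
      · rw [h] at ih; simp at ih ⊢; simpa using ih
      · rw [h] at ih; simp at ih
        by_cases hxy : x ≤ y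
        · simp [hxy, ih]
        · simp [hxy, ih]

lemma pvRuns_pairwise : ∀ l : List String, ∀ r ∈ pvRuns l, r.Pairwise (· ≤ ·) := by
  intro l
  induction l with
  | nil => simp [pvRuns]
  | cons x xs ih =>
    rw [pvRuns]
    rcases h : pvRuns xs with _ | ⟨r, rs⟩
    · simp
    · rcases r with _ | ⟨y, r'⟩
      · intro r hr
        simp at hr
        rcases hr with rfl | rfl | hr
        · simp
        · simp
        · exact ih _ (by rw [h]; exact List.mem_cons_of_mem _ hr)
      · have hy := ih (y :: r') (by rw [h]; exact List.mem_cons_self ..)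
        by_cases hxy : x ≤ y
        · simp only [if_pos hxy]
          intro s hs
          rcases List.mem_cons.mp hs with rfl | hs
          · constructor
            · intro z hz
              rcases List.mem_cons.mp hz with rfl | hz
              · exact hxy
              · exact le_trans hxy (List.rel_of_pairwise_cons hy hz)
            · exact hy
          · exact ih _ (by rw [h]; exact List.mem_cons_of_mem _ hs)
        · simp only [if_neg hxy]
          intro s hs
          rcases List.mem_cons.mp hs with rfl | hs
          · simp
          · exact ih _ (by rw [h]; exact hs)

lemma pvMerge_perm (xs ys : List String) : (pvMerge xs ys).Perm (xs ++ ys) :=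
  List.merge_perm_append _

lemma pvMerge_pairwise {xs ys : List String} (hx : xs.Pairwise (· ≤ ·))
    (hy : ys.Pairwise (· ≤ ·)) : (pvMerge xs ys).Pairwise (· ≤ ·) := by
  unfold pvMerge
  have hx' : xs.Pairwise (fun a b : String => (decide (a ≤ b)) = true) :=
    hx.imp (fun h => by simpa using h)
  have hy' : ys.Pairwise (fun a b : String => (decide (a ≤ b)) = true) :=
    hy.imp (fun h => by simpa using h)
  have := List.pairwise_merge (le := fun a b : String => decide (a ≤ b))
    (fun a b c hab hbc => by
      simp only [decide_eq_true_eq] at hab hbc ⊢; exact le_trans hab hbc)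
    (fun a b => by rcases le_total a b with h' | h' <;> simp [h'])
    xs ys hx' hy'
  exact this.imp (fun h => by simpa using h)

lemma pvMergePairs_flatten_perm (rs : List (List String)) :
    (pvMergePairs rs).flatten.Perm rs.flatten := by
  induction rs using pvMergePairs.induct with
  | case1 r1 r2 rest ih =>
    simp only [pvMergePairs, List.flatten_cons]
    have h1 := (pvMerge_perm r1 r2).append_right ((pvMergePairs rest).flatten)
    have h2 := (List.Perm.refl (r1 ++ r2)).append ih
    simpa [List.append_assoc] using h1.trans h2
  | case2 rs h =>
    cases rs with
    | nil => simp [pvMergePairs]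
    | cons r t =>
      cases t with
      | nil => simp [pvMergePairs]
      | cons r2 t2 => exact absurd rfl (h r r2 t2)

lemma pvMergePairs_pairwise (rs : List (List String)) (h : ∀ r ∈ rs, r.Pairwise (· ≤ ·)) :
    ∀ r ∈ pvMergePairs rs, r.Pairwise (· ≤ ·) := by
  induction rs using pvMergePairs.induct with
  | case1 r1 r2 rest ih =>
    intro r hr
    rcases List.mem_cons.mp hr with rfl | hr
    · exact pvMerge_pairwise (h r1 (by simp)) (h r2 (by simp))
    · exact ih (fun r hr => h r (by simp [hr])) r hr
  | case2 rs hne =>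
    cases rs with
    | nil => simp [pvMergePairs]
    | cons r t =>
      cases t with
      | nil => simpa [pvMergePairs] using h
      | cons r2 t2 => exact absurd rfl (hne r r2 t2)

lemma pvMergeAll_perm (rs : List (List String)) : (pvMergeAll rs).Perm rs.flatten := by
  induction rs using pvMergeAll.induct with
  | case1 => simp [pvMergeAll]
  | case2 r => simp [pvMergeAll]
  | case3 r1 r2 rest ih =>
    rw [pvMergeAll]
    exact ih.trans (pvMergePairs_flatten_perm _)

lemma pvMergeAll_pairwise (rs : List (List String)) (h : ∀ r ∈ rs, r.Pairwise (· ≤ ·)) :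
    (pvMergeAll rs).Pairwise (· ≤ ·) := by
  induction rs using pvMergeAll.induct with
  | case1 => simp [pvMergeAll]
  | case2 r => simpa [pvMergeAll] using h r (by simp)
  | case3 r1 r2 rest ih =>
    rw [pvMergeAll]
    exact ih (pvMergePairs_pairwise _ h)

-- pvSort is output-identical to Python's sorted() as modelled by PySem.
lemma pvSort_eq (l : List String) : pvSort l = PySem.List.sorted l (fun s => s) false := by
  apply PySem.List.eq_of_perm_of_pairwise_le_of_injective (key := fun s => s) (fun _ _ h => h)
  · exact ((pvMergeAll_perm _).trans (by rw [pvRuns_flatten])).trans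
      (PySem.List.sorted_perm l _ _).symm
  · exact pvMergeAll_pairwise _ (pvRuns_pairwise l)
  · exact PySem.List.sorted_pairwise l _

-- A's 'append one string, then re-sort' loop, started from an already sorted list,
-- is one sort of everything appended.
lemma pv_fold_sort_collapse (l : List Int) : ∀ (ys : List String),
    l.foldl (fun acc i => pvSort (acc ++ [PySem.Int.toStr i]))
      (PySem.List.sorted ys (fun s => s) false)
      = PySem.List.sorted (ys ++ l.map PySem.Int.toStr) (fun s => s) false := by
  induction l with
  | nil => intro ys; simp
  | cons i t ih =>
    intro ys
    have hstep :
        pvSort (PySem.List.sorted ys (fun s => s) false ++ [PySem.Int.toStr i])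
          = PySem.List.sorted (ys ++ [PySem.Int.toStr i]) (fun s => s) false := by
      rw [pvSort_eq]
      exact PySem.List.sorted_eq_sorted_of_perm _ _ _ (fun _ _ h => h)
        ((PySem.List.sorted_perm ys (fun s => s) false).append_right [PySem.Int.toStr i])
    simpa [hstep, List.append_assoc] using ih (ys ++ [PySem.Int.toStr i])

-- A's enumerate-scan over the parsed list is B's fused scan with a running position.
lemma pv_scan_align (k : Int) (l : List String) : ∀ (a : Int),
    pvFindEnumA k (PySem.List.enumerate (l.map (fun j => (PySem.Int.ofStr? j).getD 0)) a)
      = pvScanB k l (a + 1) := by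
  induction l with
  | nil => intro a; simp [PySem.List.enumerate_nil, pvFindEnumA, pvScanB]
  | cons j t ih =>
    intro a
    simp only [List.map_cons, PySem.List.enumerate_cons, pvFindEnumA, pvScanB]
    by_cases h : (PySem.Int.ofStr? j).getD 0 = k
    · simp [h]
    · simp [h, ih (a + 1), add_assoc]

-- ---------- decimal-digit facts ----------

lemma pvToDigitsCore_eq (b : Nat) (hb : 1 < b) :
    ∀ (f n : Nat) (l : List Char), 0 < n → n < b ^ f →
      Nat.toDigitsCore b f n l = ((Nat.digits b n).map Nat.digitChar).reverse ++ l := by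
  intro f
  induction f with
  | zero => intro n l hn hf; simp at hf; omega
  | succ f ih =>
    intro n l hn hf
    rw [Nat.toDigitsCore]
    by_cases h : n / b = 0
    · have hnb : n < b := by
        rcases Nat.div_eq_zero_iff.mp h with h' | h'
        · omega
        · exact h'
      rw [if_pos h, Nat.digits_def' hb hn, Nat.mod_eq_of_lt hnb, h]
      simp
    · rw [if_neg h]
      have hdiv : n / b < b ^ f := by
        apply Nat.div_lt_of_lt_mul
        calc n < b ^ (f + 1) := hf
        _ = b * b ^ f := by rw [pow_succ]; ring
      rw [ih (n / b) (Nat.digitChar (n % b) :: l) (Nat.pos_of_ne_zero h) hdiv,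
        Nat.digits_def' hb hn]
      simp

lemma pvToDigits_eq (n : Nat) (hn : 0 < n) :
    Nat.toDigits 10 n = ((Nat.digits 10 n).map Nat.digitChar).reverse := by
  unfold Nat.toDigits
  rw [pvToDigitsCore_eq 10 (by norm_num) (n + 1) n [] hn
    (lt_of_lt_of_le (Nat.lt_pow_self (by norm_num)) (Nat.pow_le_pow_right (by norm_num) (by omega)))]
  simp

lemma pvToChars_pos (p : Int) (hp : 1 ≤ p) :
    PySem.Int.toChars p = ((Nat.digits 10 p.toNat).map Nat.digitChar).reverse := by
  unfold PySem.Int.toChars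
  rw [if_neg (by omega)]
  exact pvToDigits_eq _ (by omega)

lemma pvToChars_step (p c : Int) (hp : 1 ≤ p) (hc0 : 0 ≤ c) (hc9 : c ≤ 9) :
    PySem.Int.toChars (10 * p + c) = PySem.Int.toChars p ++ [Nat.digitChar c.toNat] := by
  rw [pvToChars_pos _ hp, pvToChars_pos _ (by omega)]
  have h1 : (10 * p + c).toNat = 10 * p.toNat + c.toNat := by omega
  have h2 : (10 * p.toNat + c.toNat) % 10 = c.toNat := by omega
  have h3 : (10 * p.toNat + c.toNat) / 10 = p.toNat := by omega
  rw [h1, Nat.digits_def' (by norm_num : (1:Nat) < 10) (by omega), h2, h3]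
  simp

lemma pvToChars_digit (d : Int) (h1 : 1 ≤ d) (h9 : d ≤ 9) :
    PySem.Int.toChars d = [Nat.digitChar d.toNat] := by
  interval_cases d <;> rfl

lemma pvDigitChar_lt {a b : Nat} (hab : a < b) (hb : b ≤ 9) :
    Nat.digitChar a < Nat.digitChar b := by
  interval_cases b <;> interval_cases a <;> decide

lemma pvDigitChar_inj {a b : Nat} (ha : a < 10) (hb : b < 10) :
    Nat.digitChar a = Nat.digitChar b → a = b := by
  interval_cases a <;> interval_cases b <;> decide

lemma pvMapDigitChar_inj : ∀ {l1 l2 : List Nat}, (∀ x ∈ l1, x < 10) → (∀ x ∈ l2, x < 10) →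
    l1.map Nat.digitChar = l2.map Nat.digitChar → l1 = l2 := by
  intro l1
  induction l1 with
  | nil => intro l2 _ _ h; cases l2 <;> simp_all
  | cons a t ih =>
    intro l2 h1 h2 h
    cases l2 with
    | nil => simp at h
    | cons b u =>
      simp only [List.map_cons, List.cons.injEq] at h
      have := pvDigitChar_inj (h1 a (by simp)) (h2 b (by simp)) h.1
      rw [this, ih (fun x hx => h1 x (by simp [hx])) (fun x hx => h2 x (by simp [hx])) h.2]

lemma pvToStr_inj {a b : Int} (ha : 1 ≤ a) (hb : 1 ≤ b)
    (h : PySem.Int.toStr a = PySem.Int.toStr b) : a = b := by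
  have h' : PySem.Int.toChars a = PySem.Int.toChars b := by
    have := congrArg String.toList h
    simpa [PySem.Int.toList_toStr] using this
  rw [pvToChars_pos _ ha, pvToChars_pos _ hb] at h'
  have h2 : (Nat.digits 10 a.toNat).map Nat.digitChar = (Nat.digits 10 b.toNat).map Nat.digitChar := by
    have := congrArg List.reverse h'
    simpa using this
  have h3 : Nat.digits 10 a.toNat = Nat.digits 10 b.toNat :=
    pvMapDigitChar_inj (fun x hx => Nat.digits_lt_base (by norm_num) hx)
      (fun x hx => Nat.digits_lt_base (by norm_num) hx) h2
  have h4 := congrArg (Nat.ofDigits 10) h3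
  rw [Nat.ofDigits_digits, Nat.ofDigits_digits] at h4
  omega

-- ---------- lexicographic-order facts on Char lists / Strings ----------

lemma pvLexPrefix : ∀ (u : List Char) (c : Char) (r : List Char),
    List.Lex (· < ·) u (u ++ c :: r) := by
  intro u
  induction u with
  | nil => intro c r; exact List.Lex.nil
  | cons a t ih => intro c r; exact List.Lex.cons (ih c r)

lemma pvLexMid {a b : Char} (hab : a < b) : ∀ (u v w : List Char),
    List.Lex (· < ·) (u ++ a :: v) (u ++ b :: w) := by
  intro u
  induction u with
  | nil => intro v w; exact List.Lex.rel hab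
  | cons x t ih => intro v w; exact List.Lex.cons (ih v w)

lemma pvStrLt {s t : String} (h : List.Lex (· < ·) s.toList t.toList) : s < t := by
  rw [String.lt_iff_toList_lt]
  exact (List.lt_iff_lex_lt _ _).mpr h

-- ---------- the prefix-trie generator produces the sorted list ----------

lemma pvMemRange10 {c : Int} (hc : c ∈ PySem.List.pyRange 0 10 1) : 0 ≤ c ∧ c ≤ 9 := by
  rw [PySem.List.mem_pyRange_iff_of_pos (by norm_num)] at hc
  omega

lemma pvEmit_pos (n p : Int) (h : 1 ≤ p ∧ p ≤ n) :
    pvEmit n p = PySem.Int.toStr p ::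
      (PySem.List.pyRange 0 10 1).flatMap (fun c => pvEmit n (10 * p + c)) := by
  rw [pvEmit, dif_pos h]
  congr 1


lemma pvEmit_neg (n p : Int) (h : ¬ (1 ≤ p ∧ p ≤ n)) : pvEmit n p = [] := by
  rw [pvEmit, dif_neg h]

-- the generic "ordered blocks with distinct digit prefixes" lemma
lemma pvBlocks {g : Int → List String} {base : List Char} : ∀ {cs : List Int},
    cs.Pairwise (· < ·) → (∀ c ∈ cs, 0 ≤ c ∧ c ≤ 9) →
    (∀ c ∈ cs, ∀ s ∈ g c, ∃ r, s.toList = base ++ Nat.digitChar c.toNat :: r) →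
    (∀ c ∈ cs, (g c).Pairwise (· < ·)) →
    (cs.flatMap g).Pairwise (· < ·) := by
  intro cs
  induction cs with
  | nil => intro _ _ _ _; simp
  | cons c t ih =>
    intro hp hr hs hw
    rw [List.flatMap_cons, List.pairwise_append]
    refine ⟨hw c (by simp), ih hp.of_cons (fun x hx => hr x (by simp [hx]))
      (fun x hx => hs x (by simp [hx])) (fun x hx => hw x (by simp [hx])), ?_⟩
    intro s hsm t' ht'
    rcases List.mem_flatMap.mp ht' with ⟨c', hc', ht2⟩
    rcases hs c (by simp) s hsm with ⟨r1, e1⟩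
    rcases hs c' (by simp [hc']) t' ht2 with ⟨r2, e2⟩
    have hcc : c < c' := List.rel_of_pairwise_cons hp hc'
    have hlt : Nat.digitChar c.toNat < Nat.digitChar c'.toNat := by
      have h1 := hr c (by simp)
      have h2 := hr c' (by simp [hc'])
      exact pvDigitChar_lt (by omega) (by omega)
    exact pvStrLt (e1 ▸ e2 ▸ pvLexMid hlt base r1 r2)

-- shape + internal order of emit, by fuel induction on n+1-p
lemma pvEmit_good (n : Int) : ∀ (m : Nat) (p : Int), (n + 1 - p).toNat ≤ m → 1 ≤ p →
    (∀ s ∈ pvEmit n p, ∃ r, s.toList = PySem.Int.toChars p ++ r) ∧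
      (pvEmit n p).Pairwise (· < ·) := by
  intro m
  induction m with
  | zero =>
    intro p hm hp
    rw [pvEmit_neg n p (by omega)]
    simp
  | succ m ih =>
    intro p hm hp
    by_cases hpn : p ≤ n
    · rw [pvEmit_pos n p ⟨hp, hpn⟩]
      have hchild : ∀ c ∈ PySem.List.pyRange 0 10 1,
          (∀ s ∈ pvEmit n (10 * p + c), ∃ r, s.toList = PySem.Int.toChars (10 * p + c) ++ r) ∧
            (pvEmit n (10 * p + c)).Pairwise (· < ·) := by
        intro c hc
        have hb := pvMemRange10 hc
        exact ih (10 * p + c) (by omega) (by omega)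
      have hshape : ∀ c ∈ PySem.List.pyRange 0 10 1, ∀ s ∈ pvEmit n (10 * p + c),
          ∃ r, s.toList = PySem.Int.toChars p ++ Nat.digitChar c.toNat :: r := by
        intro c hc s hsm
        have hb := pvMemRange10 hc
        rcases (hchild c hc).1 s hsm with ⟨r, e⟩
        refine ⟨r, ?_⟩
        rw [e, pvToChars_step p c hp hb.1 hb.2]
        simp
      constructor
      · intro s hsm
        rcases List.mem_cons.mp hsm with rfl | hsm
        · exact ⟨[], by simp [PySem.Int.toList_toStr]⟩
        · rcases List.mem_flatMap.mp hsm with ⟨c, hc, hs2⟩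
          rcases hshape c hc s hs2 with ⟨r, e⟩
          exact ⟨Nat.digitChar c.toNat :: r, e⟩
      · rw [List.pairwise_cons]
        constructor
        · intro s hsm
          rcases List.mem_flatMap.mp hsm with ⟨c, hc, hs2⟩
          rcases hshape c hc s hs2 with ⟨r, e⟩
          apply pvStrLt
          rw [e, PySem.Int.toList_toStr]
          exact pvLexPrefix _ _ _
        · exact pvBlocks (PySem.List.pairwise_lt_pyRange_one 0 10)
            (fun c hc => pvMemRange10 hc) hshape (fun c hc => (hchild c hc).2)
    · rw [pvEmit_neg n p (by omega)]
      simp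

-- decimal-prefix relation: p is a prefix of x's decimal representation
def pvPref (p x : Int) : Prop := ∃ m : Nat, p * 10 ^ m ≤ x ∧ x < (p + 1) * 10 ^ m

lemma pvPref_ge {p x : Int} (hp : 1 ≤ p) (h : pvPref p x) : p ≤ x := by
  rcases h with ⟨m, h1, _⟩
  have : p * 1 ≤ p * 10 ^ m := by
    apply mul_le_mul_of_nonneg_left _ (by omega)
    exact one_le_pow₀ (by norm_num)
  omega

lemma pvPref_split {p x : Int} (hp : 1 ≤ p) (h : pvPref p x) :
    x = p ∨ ∃ c : Int, 0 ≤ c ∧ c ≤ 9 ∧ pvPref (10 * p + c) x := by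
  rcases h with ⟨m, h1, h2⟩
  cases m with
  | zero => left; simp at h1 h2; omega
  | succ m' =>
    right
    set T : Int := 10 ^ m' with hT
    have hTpos : 0 < T := by positivity
    have hx0 : 0 ≤ x := by
      have : (0:Int) ≤ p * 10 ^ (m' + 1) := by positivity
      omega
    set q : Int := x / T with hq
    have hqr : q * T + x % T = x := by rw [hq]; rw [mul_comm]; exact Int.ediv_add_emod x T
    have hr0 : 0 ≤ x % T := Int.emod_nonneg x (by omega)
    have hrT : x % T < T := Int.emod_lt_of_pos x hTpos
    have hpow : (10:Int) ^ (m' + 1) = T * 10 := by rw [pow_succ]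
    rw [hpow] at h1 h2
    -- 10p ≤ q
    have hlow : 10 * p ≤ q := by
      by_contra hcon
      push_neg at hcon
      have h5 : q + 1 ≤ 10 * p := by omega
      have : (q + 1) * T ≤ 10 * p * T :=
        mul_le_mul_of_nonneg_right h5 (by omega)
      nlinarith
    -- q ≤ 10p + 9
    have hhigh : q < 10 * p + 10 := by
      by_contra hcon
      push_neg at hcon
      have : (10 * p + 10) * T ≤ q * T :=
        mul_le_mul_of_nonneg_right hcon (by omega)
      nlinarith
    refine ⟨q - 10 * p, by omega, by omega, m', ?_, ?_⟩
    · rw [show (10 * p + (q - 10 * p)) = q from by ring, ← hT]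
      omega
    · rw [show (10 * p + (q - 10 * p) + 1) = q + 1 from by ring, ← hT]
      have : (q + 1) * T = q * T + T := by ring
      omega

lemma pvPref_self (p : Int) : pvPref p p := ⟨0, by simp⟩

lemma pvPref_join {p c x : Int} (hc0 : 0 ≤ c) (hc9 : c ≤ 9)
    (h : pvPref (10 * p + c) x) : pvPref p x := by
  rcases h with ⟨m, h1, h2⟩
  refine ⟨m + 1, ?_, ?_⟩
  · have : p * 10 ^ (m + 1) = 10 * p * 10 ^ m := by ring
    rw [this]
    calc 10 * p * 10 ^ m ≤ (10 * p + c) * 10 ^ m := by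
          apply mul_le_mul_of_nonneg_right (by omega) (by positivity)
    _ ≤ x := h1
  · have he : (p + 1) * 10 ^ (m + 1) = (10 * p + 10) * 10 ^ m := by ring
    rw [he]
    calc x < (10 * p + c + 1) * 10 ^ m := h2
    _ ≤ (10 * p + 10) * 10 ^ m := by
          apply mul_le_mul_of_nonneg_right (by omega) (by positivity)

-- membership characterization of the generator
lemma pvEmit_mem (n : Int) : ∀ (m : Nat) (p : Int), (n + 1 - p).toNat ≤ m → 1 ≤ p → ∀ s,
    (s ∈ pvEmit n p ↔ ∃ x : Int, x ≤ n ∧ pvPref p x ∧ s = PySem.Int.toStr x) := by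
  intro m
  induction m with
  | zero =>
    intro p hm hp s
    rw [pvEmit_neg n p (by omega)]
    simp only [List.not_mem_nil, false_iff]
    rintro ⟨x, hxn, hpx, rfl⟩
    have := pvPref_ge hp hpx
    omega
  | succ m ih =>
    intro p hm hp s
    by_cases hpn : p ≤ n
    · rw [pvEmit_pos n p ⟨hp, hpn⟩]
      simp only [List.mem_cons, List.mem_flatMap]
      constructor
      · rintro (rfl | ⟨c, hc, hs⟩)
        · exact ⟨p, hpn, pvPref_self p, rfl⟩
        · have hb := pvMemRange10 hc
          rcases (ih (10 * p + c) (by omega) (by omega) s).mp hs with ⟨x, hxn, hpx, rfl⟩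
          exact ⟨x, hxn, pvPref_join hb.1 hb.2 hpx, rfl⟩
      · rintro ⟨x, hxn, hpx, rfl⟩
        rcases pvPref_split hp hpx with rfl | ⟨c, hc0, hc9, hpx'⟩
        · left; rfl
        · right
          refine ⟨c, ?_, ?_⟩
          · rw [PySem.List.mem_pyRange_iff_of_pos (by norm_num)]
            omega
          · exact (ih (10 * p + c) (by omega) (by omega) _).mpr ⟨x, hxn, hpx', rfl⟩
    · rw [pvEmit_neg n p (by omega)]
      simp only [List.not_mem_nil, false_iff]
      rintro ⟨x, hxn, hpx, rfl⟩
      have := pvPref_ge hp hpx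
      omega

-- every x ≥ 1 lies under exactly one of the roots 1..9 (existence part)
lemma pvCover {x : Int} (hx : 1 ≤ x) : ∃ d : Int, 1 ≤ d ∧ d ≤ 9 ∧ pvPref d x := by
  set e : Nat := x.toNat with he
  have he1 : 1 ≤ e := by omega
  set m : Nat := Nat.log 10 e with hmdef
  have h1 : 10 ^ m ≤ e := Nat.pow_log_le_self 10 (by omega)
  have h2 : e < 10 ^ (m + 1) := Nat.lt_pow_succ_log_self (by norm_num) e
  set d : Nat := e / 10 ^ m with hd
  have hTpos : 0 < 10 ^ m := by positivity
  have hd1 : 1 ≤ d := (Nat.one_le_div_iff hTpos).mpr h1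
  have hd9 : d ≤ 9 := by
    have : e / 10 ^ m < 10 := by
      apply Nat.div_lt_of_lt_mul
      calc e < 10 ^ (m + 1) := h2
      _ = 10 ^ m * 10 := by rw [pow_succ]
    omega
  have hl : d * 10 ^ m ≤ e := Nat.div_mul_le_self e _
  have hu : e < (d + 1) * 10 ^ m :=
    (Nat.div_lt_iff_lt_mul hTpos).mp (by omega)
  refine ⟨(d : Int), by exact_mod_cast hd1, by exact_mod_cast hd9, m, ?_, ?_⟩
  · have : ((d * 10 ^ m : Nat) : Int) ≤ (e : Int) := by exact_mod_cast hl
    push_cast at this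
    omega
  · have : (e : Int) < (((d + 1) * 10 ^ m : Nat) : Int) := by exact_mod_cast hu
    push_cast at this
    omega

-- the full generated list: pairwise-increasing and a permutation of map str [1..n]
lemma pvOrder_pairwise (n : Int) :
    ((PySem.List.pyRange 1 10 1).flatMap (fun d => pvEmit n d)).Pairwise (· < ·) := by
  apply pvBlocks (base := []) (PySem.List.pairwise_lt_pyRange_one 1 10)
  · intro d hd
    rw [PySem.List.mem_pyRange_iff_of_pos (by norm_num)] at hd
    omega
  · intro d hd s hs
    rw [PySem.List.mem_pyRange_iff_of_pos (by norm_num)] at hd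
    rcases (pvEmit_good n (n + 1 - d).toNat d le_rfl (by omega)).1 s hs with ⟨r, e⟩
    exact ⟨r, by rw [e, pvToChars_digit d (by omega) (by omega)]; simp⟩
  · intro d hd
    rw [PySem.List.mem_pyRange_iff_of_pos (by norm_num)] at hd
    exact (pvEmit_good n (n + 1 - d).toNat d le_rfl (by omega)).2

lemma pvOrder_mem (n : Int) (s : String) :
    s ∈ (PySem.List.pyRange 1 10 1).flatMap (fun d => pvEmit n d) ↔
      ∃ x : Int, 1 ≤ x ∧ x ≤ n ∧ s = PySem.Int.toStr x := by
  rw [List.mem_flatMap]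
  constructor
  · rintro ⟨d, hd, hs⟩
    rw [PySem.List.mem_pyRange_iff_of_pos (by norm_num)] at hd
    rcases (pvEmit_mem n (n + 1 - d).toNat d le_rfl (by omega) s).mp hs with ⟨x, hxn, hpx, rfl⟩
    exact ⟨x, le_trans (by omega) (pvPref_ge (by omega) hpx), hxn, rfl⟩
  · rintro ⟨x, hx1, hxn, rfl⟩
    rcases pvCover hx1 with ⟨d, hd1, hd9, hpx⟩
    refine ⟨d, ?_, ?_⟩
    · rw [PySem.List.mem_pyRange_iff_of_pos (by norm_num)]
      omega
    · exact (pvEmit_mem n (n + 1 - d).toNat d le_rfl (by omega) _).mpr ⟨x, hxn, hpx, rfl⟩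

lemma pvOrder_eq_sorted (n : Int) :
    PySem.List.sorted ((PySem.List.pyRange 1 (n + 1) 1).map PySem.Int.toStr) (fun s => s) false
      = (PySem.List.pyRange 1 10 1).flatMap (fun d => pvEmit n d) := by
  apply PySem.List.sorted_eq_of_perm_of_pairwise_lt
  · -- permutation: both sides are Nodup with the same membership
    rw [List.perm_ext_iff_of_nodup]
    · intro s
      rw [pvOrder_mem]
      constructor
      · rintro ⟨x, hx1, hxn, rfl⟩
        simp only [List.mem_map]
        refine ⟨x, ?_, rfl⟩
        rw [PySem.List.mem_pyRange_iff_of_pos (by norm_num)]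
        omega
      · intro hs
        simp only [List.mem_map] at hs
        rcases hs with ⟨x, hx, rfl⟩
        rw [PySem.List.mem_pyRange_iff_of_pos (by norm_num)] at hx
        exact ⟨x, by omega, by omega, rfl⟩
    · exact (pvOrder_pairwise n).imp ne_of_lt
    · apply List.Nodup.map_on
      · intro a ha b hb h
        rw [PySem.List.mem_pyRange_iff_of_pos (by norm_num)] at ha hb
        exact pvToStr_inj (by omega) (by omega) h
      · exact PySem.List.nodup_pyRange_one 1 (n + 1)
  · exact pvOrder_pairwise n

-- ===== VERDICT (by name: the statement is the Claim_ definition above) =====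
theorem strange_math_spec : Claim_equal_strange_math := by
  intro n k _
  unfold Spec_strange_math strange_math strange_math_alt
  have h0 :
      (PySem.List.pyRange 1 (n + 1) 1).foldl
        (fun acc i => pvSort (acc ++ [PySem.Int.toStr i])) []
        = PySem.List.sorted ((PySem.List.pyRange 1 (n + 1) 1).map PySem.Int.toStr) (fun s => s) false := by
    simpa using pv_fold_sort_collapse (PySem.List.pyRange 1 (n + 1) 1) []
  rw [h0]
  have h1 := pv_scan_align k
    (PySem.List.sorted ((PySem.List.pyRange 1 (n + 1) 1).map PySem.Int.toStr) (fun s => s) false) 0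
  simp only [zero_add] at h1
  rw [h1, pvOrder_eq_sorted n]
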